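-- pv_equiv track=rewrite | github.com/bobbychansfu/sfu_judge_problems | 1079/submissions/iron.py | plate_combinations
-- ===== SOURCE A (Python) =====
-- def plate_combinations(total_weight):
--     results = []
--
--     # Calculate the maximum number of 20kg, 10kg, and 5kg plates possible for the given weight
--     max_20kg = total_weight // 20
--     max_10kg = total_weight // 10
--     max_5kg = total_weight // 5
--
--     # Loop through all possible combinations of plates
--     for num_20kg in range(max_20kg, -1, -1):
--         for num_10kg in range(max_10kg, -1, -1):
--             for num_5kg in range(max_5kg, -1, -1):
--                 if num_20kg * 20 + num_10kg * 10 + num_5kg * 5 == total_weight: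
--                     results.append(f"20kg: {num_20kg}, 10kg: {num_10kg}, 5kg: {num_5kg}")
--
--     return results
-- ===== SOURCE B (Python) =====
-- def plate_combinations(total_weight):
--     # No combination exists unless the weight is a nonnegative multiple of 5.
--     if total_weight < 0 or total_weight % 5 != 0:
--         return []
--     results = []
--     for num_20kg in range(total_weight // 20, -1, -1):
--         rem = total_weight - 20 * num_20kg
--         for num_10kg in range(rem // 10, -1, -1):
--             num_5kg = (rem - 10 * num_10kg) // 5
--             results.append(f"20kg: {num_20kg}, 10kg: {num_10kg}, 5kg: {num_5kg}")
--     return results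
-- ===== Notes on version B (the rewrite author's own statement) =====
-- stated objective: faster
-- what changed: B drops the brute-force innermost 5kg scan and the oversized 10kg range: it checks divisibility by 5 once, iterates 10kg counts only up to the remaining weight, and computes the unique 5kg count by arithmetic, turning O(n^3) guessing into O(n^2) direct enumeration.
import Mathlib
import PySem

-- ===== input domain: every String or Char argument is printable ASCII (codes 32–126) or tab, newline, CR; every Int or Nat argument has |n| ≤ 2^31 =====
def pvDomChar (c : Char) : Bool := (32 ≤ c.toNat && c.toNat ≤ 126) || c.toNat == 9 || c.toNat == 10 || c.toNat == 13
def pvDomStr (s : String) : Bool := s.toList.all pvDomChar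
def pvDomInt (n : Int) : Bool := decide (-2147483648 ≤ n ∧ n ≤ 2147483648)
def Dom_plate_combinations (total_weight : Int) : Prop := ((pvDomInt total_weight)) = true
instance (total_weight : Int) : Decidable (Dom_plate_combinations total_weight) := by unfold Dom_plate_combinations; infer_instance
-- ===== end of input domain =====

-- B replaces A's brute-force innermost 5kg scan and oversized 10kg range by a divisibility
-- check and direct arithmetic for the 5kg count (objective: faster, O(n^2) vs O(n^3)).

-- ===== PORT A =====
-- f"20kg: {a}, 10kg: {b}, 5kg: {c}"  (shared format helper for both ports)
def pvFmt (a b c : Int) : String :=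
  "20kg: " ++ PySem.Int.toStr a ++ ", 10kg: " ++ PySem.Int.toStr b ++ ", 5kg: " ++ PySem.Int.toStr c

def plate_combinations (total_weight : Int) : List String :=
  let results : List String := []
  let max_20kg := PySem.Int.floordiv total_weight 20
  let max_10kg := PySem.Int.floordiv total_weight 10
  let max_5kg := PySem.Int.floordiv total_weight 5
  (PySem.List.pyRange max_20kg (-1) (-1)).foldl (fun results num_20kg =>
    (PySem.List.pyRange max_10kg (-1) (-1)).foldl (fun results num_10kg =>
      (PySem.List.pyRange max_5kg (-1) (-1)).foldl (fun results num_5kg =>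
        if num_20kg * 20 + num_10kg * 10 + num_5kg * 5 = total_weight then
          results ++ [pvFmt num_20kg num_10kg num_5kg]
        else results) results) results) results

-- ===== PORT B =====
def plate_combinations_alt (total_weight : Int) : List String :=
  if total_weight < 0 ∨ PySem.Int.mod total_weight 5 ≠ 0 then []
  else
    (PySem.List.pyRange (PySem.Int.floordiv total_weight 20) (-1) (-1)).foldl (fun results num_20kg =>
      let rem := total_weight - 20 * num_20kg
      (PySem.List.pyRange (PySem.Int.floordiv rem 10) (-1) (-1)).foldl (fun results num_10kg =>
        results ++ [pvFmt num_20kg num_10kg (PySem.Int.floordiv (rem - 10 * num_10kg) 5)]) results) []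

-- ===== PRECONDITION & SPEC =====
def Spec_plate_combinations (total_weight : Int) (out : List String) : Prop := out = plate_combinations_alt total_weight
instance (total_weight : Int) (out : List String) : Decidable (Spec_plate_combinations total_weight out) := by unfold Spec_plate_combinations; infer_instance

-- ===== CLAIM (what is proved, stated in full; the proofs are below) =====
def Claim_equal_plate_combinations : Prop := ∀ (total_weight : Int), Dom_plate_combinations total_weight → Spec_plate_combinations total_weight (plate_combinations total_weight)

-- ===== LEMMAS AND PROOFS =====

-- foldl with "if P then append one element" = append of filter-map
lemma pv_foldl_ite_append (P : Int → Prop) [DecidablePred P] (f : Int → String)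
    (l : List Int) (acc : List String) :
    l.foldl (fun acc c => if P c then acc ++ [f c] else acc) acc
      = acc ++ (l.filter (fun c => decide (P c))).map f := by
  induction l generalizing acc with
  | nil => simp
  | cons x xs ih =>
    by_cases h : P x <;> simp [List.foldl_cons, h, ih]

lemma pv_flatMap_eq_map_of_mem (l : List Int) (f : Int → List String) (g : Int → String)
    (h : ∀ x ∈ l, f x = [g x]) : l.flatMap f = l.map g := by
  induction l with
  | nil => simp
  | cons x xs ih =>
    simp only [List.flatMap_cons, List.map_cons, h x (by simp),
      ih (fun y hy => h y (by simp [hy]))]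
    simp

-- split a descending range at m
lemma pv_desc_split (M m : Int) (h0 : -1 ≤ m) (h : m ≤ M) :
    PySem.List.pyRange M (-1) (-1)
      = PySem.List.pyRange M m (-1) ++ PySem.List.pyRange m (-1) (-1) := by
  rw [PySem.List.pyRange_neg_one_eq_reverse, PySem.List.pyRange_neg_one_eq_reverse,
    PySem.List.pyRange_neg_one_eq_reverse, ← List.reverse_append]
  norm_num
  exact PySem.List.pyRange_one_append 0 (m+1) (M+1) (by omega) (by omega)

-- filtering a descending range by a predicate that holds only at t gives [t]
lemma pv_filter_desc (t : Int) (h0 : 0 ≤ t) (P : Int → Prop) [DecidablePred P]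
    (hP : ∀ c, P c ↔ c = t) :
    ∀ M, t ≤ M →
      (PySem.List.pyRange M (-1) (-1)).filter (fun c => decide (P c)) = [t] := by
  intro M hM
  induction M, hM using Int.le_induction with
  | base =>
    rw [PySem.List.pyRange_neg_one_cons (by omega), List.filter_cons]
    have hd : (decide (P t) : Bool) = true := by simp only [decide_eq_true_eq, hP]
    rw [hd, if_pos rfl]
    congr 1
    rw [List.filter_eq_nil_iff]
    intro x hx
    have hxx := PySem.List.mem_pyRange_neg_one.mp hx
    simp only [decide_eq_true_eq, hP]
    omega
  | succ n hn ih =>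
    rw [PySem.List.pyRange_neg_one_cons (by omega), List.filter_cons]
    have hd : (decide (P (n + 1)) : Bool) = false := by
      simp only [decide_eq_false_iff_not, hP]; omega
    rw [hd]
    simp only [Bool.false_eq_true, if_false]
    have hsub : n + 1 - 1 = n := by ring
    rw [hsub]
    exact ih

lemma pv_flatMap_congr (l : List Int) (f g : Int → List String)
    (h : ∀ x ∈ l, f x = g x) : l.flatMap f = l.flatMap g := by
  induction l with
  | nil => simp
  | cons x xs ih =>
    simp only [List.flatMap_cons, h x (by simp), ih (fun y hy => h y (by simp [hy]))]

-- A in flatMap normal form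
lemma pv_A_norm (W : Int) :
    plate_combinations W
      = (PySem.List.pyRange (PySem.Int.floordiv W 20) (-1) (-1)).flatMap (fun a =>
          (PySem.List.pyRange (PySem.Int.floordiv W 10) (-1) (-1)).flatMap (fun b =>
            ((PySem.List.pyRange (PySem.Int.floordiv W 5) (-1) (-1)).filter
                (fun c => decide (a * 20 + b * 10 + c * 5 = W))).map (pvFmt a b))) := by
  unfold plate_combinations
  rw [PySem.List.foldl_congr_mem _ _
    (fun results a =>
      results ++ (PySem.List.pyRange (PySem.Int.floordiv W 10) (-1) (-1)).flatMap (fun b =>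
        ((PySem.List.pyRange (PySem.Int.floordiv W 5) (-1) (-1)).filter
            (fun c => decide (a * 20 + b * 10 + c * 5 = W))).map (pvFmt a b)))
    _ ?_]
  · rw [PySem.List.foldl_append_eq_flatMap]; rfl
  · intro acc a _
    rw [PySem.List.foldl_congr_mem _ _
      (fun results b =>
        results ++ ((PySem.List.pyRange (PySem.Int.floordiv W 5) (-1) (-1)).filter
            (fun c => decide (a * 20 + b * 10 + c * 5 = W))).map (pvFmt a b))
      _ ?_]
    · rw [PySem.List.foldl_append_eq_flatMap]
    · intro acc' b _
      exact pv_foldl_ite_append (fun c => a * 20 + b * 10 + c * 5 = W) _ _ _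

-- B in map normal form (main branch)
lemma pv_B_norm (W : Int) (h : ¬ (W < 0 ∨ PySem.Int.mod W 5 ≠ 0)) :
    plate_combinations_alt W
      = (PySem.List.pyRange (PySem.Int.floordiv W 20) (-1) (-1)).flatMap (fun a =>
          (PySem.List.pyRange (PySem.Int.floordiv (W - 20 * a) 10) (-1) (-1)).map (fun b =>
            pvFmt a b (PySem.Int.floordiv ((W - 20 * a) - 10 * b) 5))) := by
  unfold plate_combinations_alt
  rw [if_neg h]
  rw [PySem.List.foldl_congr_mem _ _
    (fun results a =>
      results ++ (PySem.List.pyRange (PySem.Int.floordiv (W - 20 * a) 10) (-1) (-1)).map (fun b =>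
        pvFmt a b (PySem.Int.floordiv ((W - 20 * a) - 10 * b) 5)))
    _ ?_]
  · rw [PySem.List.foldl_append_eq_flatMap]; rfl
  · intro acc a _
    exact PySem.List.foldl_append_singleton_eq_map _ _ _

-- the inner two loops of A collapse, for each admissible a, to B's single loop
lemma pv_inner_eq (W a : Int) (_hW : 0 ≤ W) (h5 : (5:Int) ∣ W) (ha : 0 ≤ a) (haW : 20 * a ≤ W) :
    (PySem.List.pyRange (W / 10) (-1) (-1)).flatMap (fun b =>
        ((PySem.List.pyRange (W / 5) (-1) (-1)).filter
            (fun c => decide (a * 20 + b * 10 + c * 5 = W))).map (pvFmt a b))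
      = (PySem.List.pyRange ((W - 20 * a) / 10) (-1) (-1)).map (fun b =>
          pvFmt a b (((W - 20 * a) - 10 * b) / 5)) := by
  have hr : 0 ≤ W - 20 * a := by omega
  have hm0 : 0 ≤ (W - 20 * a) / 10 := by positivity
  have hmle : (W - 20 * a) / 10 ≤ W / 10 := by omega
  rw [pv_desc_split (W / 10) ((W - 20 * a) / 10) (by omega) hmle, List.flatMap_append]
  have hfirst : (PySem.List.pyRange (W / 10) ((W - 20 * a) / 10) (-1)).flatMap (fun b =>
      ((PySem.List.pyRange (W / 5) (-1) (-1)).filter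
          (fun c => decide (a * 20 + b * 10 + c * 5 = W))).map (pvFmt a b)) = [] := by
    rw [List.flatMap_eq_nil_iff]
    intro b hb
    have hbb := PySem.List.mem_pyRange_neg_one.mp hb
    have hfil : (PySem.List.pyRange (W / 5) (-1) (-1)).filter
        (fun c => decide (a * 20 + b * 10 + c * 5 = W)) = [] := by
      rw [List.filter_eq_nil_iff]
      intro c hc
      have hcc := PySem.List.mem_pyRange_neg_one.mp hc
      simp only [decide_eq_true_eq]
      omega
    rw [hfil, List.map_nil]
  rw [hfirst, List.nil_append]
  apply pv_flatMap_eq_map_of_mem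
  intro b hb
  have hbb := PySem.List.mem_pyRange_neg_one.mp hb
  have ht0 : 0 ≤ ((W - 20 * a) - 10 * b) / 5 := by omega
  have hPt : ∀ c, (a * 20 + b * 10 + c * 5 = W) ↔ c = ((W - 20 * a) - 10 * b) / 5 := by
    intro c; omega
  rw [pv_filter_desc _ ht0 _ hPt (W / 5) (by omega), List.map_singleton]

-- ===== VERDICT (by name: the statement is the Claim_ definition above) =====
theorem plate_combinations_spec : Claim_equal_plate_combinations := by
  intro W _
  unfold Spec_plate_combinations
  by_cases hneg : W < 0
  · have h20 : PySem.Int.floordiv W 20 ≤ -1 := by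
      rw [PySem.Int.floordiv_eq_ediv_of_pos (by norm_num)]; omega
    rw [pv_A_norm, PySem.List.pyRange_neg_one_eq_nil h20]
    unfold plate_combinations_alt
    rw [if_pos (Or.inl hneg)]
    rfl
  · by_cases hm : PySem.Int.mod W 5 ≠ 0
    · -- weight not a multiple of 5: both sides are empty
      have hW : 0 ≤ W := by omega
      have hm' : ¬ ((5:Int) ∣ W) := by
        rw [PySem.Int.mod_eq_emod_of_pos (by norm_num)] at hm
        omega
      rw [pv_A_norm]
      unfold plate_combinations_alt
      rw [if_pos (Or.inr hm)]
      rw [List.flatMap_eq_nil_iff]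
      intro a _
      rw [List.flatMap_eq_nil_iff]
      intro b _
      have : (PySem.List.pyRange (PySem.Int.floordiv W 5) (-1) (-1)).filter
          (fun c => decide (a * 20 + b * 10 + c * 5 = W)) = [] := by
        rw [List.filter_eq_nil_iff]
        intro c _
        simp only [decide_eq_true_eq]
        omega
      rw [this, List.map_nil]
    · -- main case
      have hW : 0 ≤ W := by omega
      have h5 : (5:Int) ∣ W := by
        rw [PySem.Int.mod_eq_emod_of_pos (by norm_num)] at hm
        omega
      rw [pv_A_norm, pv_B_norm W (by tauto)]
      simp only [PySem.Int.floordiv_eq_ediv_of_pos (show (0:Int) < 20 by norm_num),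
        PySem.Int.floordiv_eq_ediv_of_pos (show (0:Int) < 10 by norm_num),
        PySem.Int.floordiv_eq_ediv_of_pos (show (0:Int) < 5 by norm_num)]
      apply pv_flatMap_congr
      intro a ha
      have haa := PySem.List.mem_pyRange_neg_one.mp ha
      exact pv_inner_eq W a hW h5 (by omega) (by omega)
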